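-- pv_equiv track=rewrite | github.com/wanhaimin/whm_Odoo_project | custom_addons/diecut/scripts/tds_worker/prompt/context_builder.py | filter_few_shots
-- ===== SOURCE A (Python) =====
-- def clean_text(value) -> str:
--     return str(value or "").strip()
--
-- def filter_few_shots(skill_bundle: dict, keyword_flags: dict[str, bool], limit: int = 4) -> list[str]:
--     examples = skill_bundle.get("few_shot_examples") or []
--     picked = []
--     match_rules = [
--         ("pluck", ["pluck"]),
--         ("torque", ["torque"]),
--         ("static_shear", ["static shear"]),
--         ("liner", ["liner"]),
--         ("peel", ["painted panel", "peel"]),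
--         ("gt_series", ["gt7100"]),
--         ("dc_series", ["dc2000", "pluck", "torque", "static shear"]),
--     ]
--     lower_examples = [(ex, clean_text(ex).lower()) for ex in examples]
--     for topic, needles in match_rules:
--         if not keyword_flags.get(topic):
--             continue
--         for ex, low in lower_examples:
--             if any(n in low for n in needles) and ex not in picked:
--                 picked.append(ex)
--     for ex in examples:
--         if ex not in picked:
--             picked.append(ex)
--         if len(picked) >= limit:
--             break
--     return picked[:limit]
-- ===== SOURCE B (Python) =====
-- def clean_text(value) -> str:
--     return str(value or "").strip()
--
-- def filter_few_shots(skill_bundle: dict, keyword_flags: dict[str, bool], limit: int = 4) -> list[str]: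
--     examples = skill_bundle.get("few_shot_examples") or []
--     match_rules = [
--         ("pluck", ["pluck"]),
--         ("torque", ["torque"]),
--         ("static_shear", ["static shear"]),
--         ("liner", ["liner"]),
--         ("peel", ["painted panel", "peel"]),
--         ("gt_series", ["gt7100"]),
--         ("dc_series", ["dc2000", "pluck", "torque", "static shear"]),
--     ]
--     # ranks of the active rules, in rule order
--     active = [(rank, needles)
--               for rank, (topic, needles) in enumerate(match_rules)
--               if keyword_flags.get(topic)]
--     # one pass over the examples: tag each with the rank of the first active rule it matches
--     tagged = []
--     for idx, ex in enumerate(examples):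
--         low = clean_text(ex).lower()
--         for rank, needles in active:
--             if any(n in low for n in needles):
--                 tagged.append((rank, idx, ex))
--                 break
--     picked = []
--     # stable sort by rank; insertion order already gives index order within a rank
--     for _, _, ex in sorted(tagged, key=lambda t: (t[0], t[1])):
--         if ex not in picked:
--             picked.append(ex)
--     for ex in examples:
--         if ex not in picked:
--             picked.append(ex)
--         if len(picked) >= limit:
--             break
--     return picked[:limit]
-- ===== Notes on version B (the rewrite author's own statement) =====
-- stated objective: alternative
-- what changed: Instead of scanning all examples once per active rule (rules outer, examples inner), B makes a single indexing pass over the examples tagging each with the rank of the first active rule it matches, stable-sorts the tags by (rank, index), and dedup-appends in that order; the fill loop and final truncation are unchanged.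
import Mathlib
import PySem

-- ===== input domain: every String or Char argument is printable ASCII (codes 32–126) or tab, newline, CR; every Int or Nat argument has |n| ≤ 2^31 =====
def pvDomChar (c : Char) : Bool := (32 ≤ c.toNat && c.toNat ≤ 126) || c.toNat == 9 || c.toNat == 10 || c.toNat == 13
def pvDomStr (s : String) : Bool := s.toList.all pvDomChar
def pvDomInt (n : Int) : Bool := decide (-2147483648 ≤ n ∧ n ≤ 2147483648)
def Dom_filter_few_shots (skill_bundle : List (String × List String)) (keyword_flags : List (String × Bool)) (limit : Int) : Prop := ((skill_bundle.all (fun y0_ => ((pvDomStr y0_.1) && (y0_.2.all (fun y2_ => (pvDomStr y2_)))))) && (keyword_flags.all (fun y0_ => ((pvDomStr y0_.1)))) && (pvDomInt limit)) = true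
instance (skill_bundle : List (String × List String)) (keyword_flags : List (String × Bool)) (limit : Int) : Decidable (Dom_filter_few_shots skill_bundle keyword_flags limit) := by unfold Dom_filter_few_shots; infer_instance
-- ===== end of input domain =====

-- B replaces A's rule-outer/example-inner nested scans by one tagging pass over the
-- examples plus a stable sort by (rank, index): an alternative decomposition, same cost class.

-- ===== PORT A =====

-- helper clean_text of the same module (str(value or "").strip(); value is a str here)
def clean_text (value : String) : String :=
  PySem.Str.strip (if value == "" then "" else value)

-- the match_rules literal (shared: B's source carries the same table verbatim)
def fsMatchRules : List (String × List String) :=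
  [("pluck", ["pluck"]),
   ("torque", ["torque"]),
   ("static_shear", ["static shear"]),
   ("liner", ["liner"]),
   ("peel", ["painted panel", "peel"]),
   ("gt_series", ["gt7100"]),
   ("dc_series", ["dc2000", "pluck", "torque", "static shear"])]

-- skill_bundle.get("few_shot_examples") or []  (shared first line of both sources)
def fsExamples (skill_bundle : List (String × List String)) : List String :=
  match (PySem.Dict.mk skill_bundle).get? "few_shot_examples" with
  | none => []
  | some l => if l.isEmpty then [] else l

-- the final fill loop, shared verbatim by both sources:
-- for ex in examples: if ex not in picked: picked.append(ex); if len(picked) >= limit: break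
def fsFill (limit : Int) : List String → List String → List String
  | [], picked => picked
  | ex :: rest, picked =>
    let picked' := if picked.contains ex then picked else picked ++ [ex]
    if limit ≤ (picked'.length : Int) then picked' else fsFill limit rest picked'

def filter_few_shots (skill_bundle : List (String × List String)) (keyword_flags : List (String × Bool)) (limit : Int) : List String :=
  let examples := fsExamples skill_bundle
  let lower_examples := examples.map (fun ex => (ex, PySem.Str.lower (clean_text ex)))
  let picked := fsMatchRules.foldl (fun picked rule =>
      if (PySem.Dict.mk keyword_flags).getD rule.1 false = false then picked
      else lower_examples.foldl (fun picked el =>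
          if (rule.2.any fun n => PySem.Str.isIn n el.2) && !picked.contains el.1
          then picked ++ [el.1] else picked) picked) []
  PySem.List.slice (fsFill limit examples picked) none (some limit)

-- ===== PORT B =====

def filter_few_shots_alt (skill_bundle : List (String × List String)) (keyword_flags : List (String × Bool)) (limit : Int) : List String :=
  let examples := fsExamples skill_bundle
  -- active = [(rank, needles) for rank,(topic,needles) in enumerate(match_rules) if keyword_flags.get(topic)]
  let active := (PySem.List.enumerate fsMatchRules).filterMap
      (fun q => if (PySem.Dict.mk keyword_flags).getD q.2.1 false then some (q.1, q.2.2) else none)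
  -- one pass: tag each example with the rank of the first active rule it matches
  let tagged := (PySem.List.enumerate examples).foldl (fun acc p =>
      let low := PySem.Str.lower (clean_text p.2)
      match active.find? (fun rn => rn.2.any fun n => PySem.Str.isIn n low) with
      | some rn => acc ++ [(rn.1, p.1, p.2)]
      | none => acc) []
  -- sorted(tagged, key=lambda t: (t[0], t[1]))
  let srt := PySem.List.sorted2 tagged (fun t => t.1) (fun t => t.2.1)
  let picked := srt.foldl (fun picked t =>
      if picked.contains t.2.2 then picked else picked ++ [t.2.2]) []
  PySem.List.slice (fsFill limit examples picked) none (some limit)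

-- ===== PRECONDITION & SPEC =====
def Spec_filter_few_shots (skill_bundle : List (String × List String)) (keyword_flags : List (String × Bool)) (limit : Int) (out : List String) : Prop := out = filter_few_shots_alt skill_bundle keyword_flags limit
instance (skill_bundle : List (String × List String)) (keyword_flags : List (String × Bool)) (limit : Int) (out : List String) : Decidable (Spec_filter_few_shots skill_bundle keyword_flags limit out) := by unfold Spec_filter_few_shots; infer_instance

-- ===== CLAIM (what is proved, stated in full; the proofs are below) =====
def Claim_equal_filter_few_shots : Prop := ∀ (skill_bundle : List (String × List String)) (keyword_flags : List (String × Bool)) (limit : Int), Dom_filter_few_shots skill_bundle keyword_flags limit → Spec_filter_few_shots skill_bundle keyword_flags limit (filter_few_shots skill_bundle keyword_flags limit)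

-- ===== LEMMAS AND PROOFS =====

-- whether example ex matches the needle list
def fsMt (needles : List String) (ex : String) : Bool :=
  needles.any fun n => PySem.Str.isIn n (PySem.Str.lower (clean_text ex))

-- the active rules with their ranks (what B's first comprehension computes)
def fsActive (kf : List (String × Bool)) : List (Int × List String) :=
  (PySem.List.enumerate fsMatchRules).filterMap
    (fun q => if (PySem.Dict.mk kf).getD q.2.1 false then some (q.1, q.2.2) else none)

-- append-if-new fold ("if x not in picked: picked.append(x)") over a stream
def dedupAcc (p : List String) (s : List String) : List String :=
  s.foldl (fun p x => if p.contains x then p else p ++ [x]) p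

theorem dedupAcc_cons (p : List String) (x : String) (s : List String) :
    dedupAcc p (x :: s) = dedupAcc (if x ∈ p then p else p ++ [x]) s := by
  by_cases h : x ∈ p <;> simp [dedupAcc, List.foldl_cons, h]

theorem dedupAcc_append (p : List String) (s t : List String) :
    dedupAcc p (s ++ t) = dedupAcc (dedupAcc p s) t := by
  simp [dedupAcc, List.foldl_append]

theorem mem_dedupAcc_of_mem_left {x : String} (p s : List String) (h : x ∈ p) :
    x ∈ dedupAcc p s := by
  induction s generalizing p with
  | nil => exact h
  | cons y ys ih =>
    rw [dedupAcc_cons]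
    split_ifs with hy
    · exact ih p h
    · exact ih _ (by simp [h])

theorem mem_dedupAcc_of_mem {x : String} (p s : List String) (h : x ∈ s) :
    x ∈ dedupAcc p s := by
  induction s generalizing p with
  | nil => cases h
  | cons y ys ih =>
    rw [dedupAcc_cons]
    rcases List.mem_cons.mp h with rfl | hx
    · split_ifs with hy
      · exact mem_dedupAcc_of_mem_left _ _ hy
      · exact mem_dedupAcc_of_mem_left _ _ (by simp)
    · split_ifs with hy <;> exact ih _ hx

-- dropping stream elements that are already in the accumulator does not change the result
theorem dedupAcc_filter (q : String → Bool) (s p : List String)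
    (h : ∀ x ∈ s, q x = false → x ∈ p) :
    dedupAcc p (s.filter q) = dedupAcc p s := by
  induction s generalizing p with
  | nil => rfl
  | cons y ys ih =>
    by_cases hq : q y
    · rw [List.filter_cons_of_pos hq, dedupAcc_cons, dedupAcc_cons]
      split_ifs with hy
      · exact ih p (fun x hx hqx => h x (List.mem_cons_of_mem _ hx) hqx)
      · exact ih _ (fun x hx hqx => by
          simpa using Or.inl (h x (List.mem_cons_of_mem _ hx) hqx))
    · have hy : y ∈ p := h y List.mem_cons_self (by simpa using hq)
      rw [List.filter_cons_of_neg (by simpa using hq), dedupAcc_cons, if_pos hy]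
      exact ih p (fun x hx hqx => h x (List.mem_cons_of_mem _ hx) hqx)

-- A's inner example loop is a filtered dedup-append
theorem inner_eq (l : List String) (q : String → Bool) (p : List String) :
    l.foldl (fun p ex => if q ex && !p.contains ex then p ++ [ex] else p) p
      = dedupAcc p (l.filter q) := by
  induction l generalizing p with
  | nil => rfl
  | cons x xs ih =>
    simp only [List.foldl_cons]
    by_cases hq : q x
    · rw [List.filter_cons_of_pos hq, dedupAcc_cons]
      by_cases hc : x ∈ p
      · rw [if_neg (by simp [hq, hc]), if_pos hc]; exact ih p
      · rw [if_pos (by simp [hq, hc]), if_neg hc]; exact ih _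
    · rw [List.filter_cons_of_neg (by simpa using hq), if_neg (by simp [hq])]
      exact ih p

-- folding dedupAcc over blocks is dedupAcc of the flattened stream
theorem foldl_dedupAcc {β : Type} (L : List β) (g : β → List String) (p : List String) :
    L.foldl (fun p b => dedupAcc p (g b)) p = dedupAcc p (L.map g).flatten := by
  induction L generalizing p with
  | nil => rfl
  | cons b bs ih => simp [List.foldl_cons, ih, dedupAcc_append]

-- A's rule loop restricted to the active rules (with their ranks)
theorem outer_eq (step : List String → List String → List String)
    (flag : String → Bool) :
    ∀ (rules : List (String × List String)) (i : Int) (p : List String),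
    rules.foldl (fun p rule => if flag rule.1 = false then p else step rule.2 p) p
      = ((PySem.List.enumerate rules i).filterMap
          (fun q => if flag q.2.1 then some (q.1, q.2.2) else none)).foldl
          (fun p rn => step rn.2 p) p := by
  intro rules
  induction rules with
  | nil => intro i p; rfl
  | cons r rs ih =>
    intro i p
    rw [PySem.List.enumerate_cons]
    by_cases hf : flag r.1 <;> simp [hf, ih (i + 1)]

-- the filterMap producing tagged, abstracted
def fsTag (active : List (Int × List String)) (p : Int × String) : Option (Int × Int × String) :=
  (active.find? (fun rn => fsMt rn.2 p.2)).map (fun rn => (rn.1, p.1, p.2))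

-- B's tagging loop is a filterMap over the enumerated examples
theorem tagged_eq (active : List (Int × List String)) :
    ∀ (l : List (Int × String)) (acc : List (Int × Int × String)),
    l.foldl (fun acc p =>
        match active.find? (fun rn => rn.2.any fun n =>
            PySem.Str.isIn n (PySem.Str.lower (clean_text p.2))) with
        | some rn => acc ++ [(rn.1, p.1, p.2)]
        | none => acc) acc = acc ++ l.filterMap (fsTag active) := by
  intro l
  induction l with
  | nil => simp
  | cons x xs ih =>
    intro acc
    simp only [List.foldl_cons, List.filterMap_cons]
    cases h : active.find? (fun rn => fsMt rn.2 x.2) with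
    | none =>
      have hf : fsTag active x = none := by unfold fsTag; rw [h]; rfl
      rw [show (active.find? (fun rn => rn.2.any fun n =>
          PySem.Str.isIn n (PySem.Str.lower (clean_text x.2)))) = none from h, hf]
      exact ih acc
    | some rn =>
      have hf : fsTag active x = some (rn.1, x.1, x.2) := by unfold fsTag; rw [h]; rfl
      rw [show (active.find? (fun rn => rn.2.any fun n =>
          PySem.Str.isIn n (PySem.Str.lower (clean_text x.2)))) = some rn from h, hf]
      rw [ih]
      simp

-- first-matching-rank predicate (what an example's tag rank is, as a Bool test)
def fsP (active : List (Int × List String)) (r : Int) (ex : String) : Bool :=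
  match active.find? (fun rn => fsMt rn.2 ex) with
  | some rn => rn.1 == r
  | none => false

-- a rank-r block of tagged, mapped back to the example strings
theorem block_map_eq (active : List (Int × List String)) (r : Int) :
    ∀ (l : List String) (i : Int),
    (((PySem.List.enumerate l i).filterMap (fsTag active)).filter
        (fun t => t.1 == r)).map (fun t => t.2.2)
      = l.filter (fsP active r) := by
  intro l
  induction l with
  | nil => intro i; rfl
  | cons x xs ih =>
    intro i
    rw [PySem.List.enumerate_cons]
    simp only [List.filterMap_cons]
    cases h : (active.find? (fun rn => fsMt rn.2 x)) with
    | none =>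
      have hf : fsTag active (i, x) = none := by unfold fsTag; rw [h]; rfl
      have hp : fsP active r x = false := by unfold fsP; rw [h]
      simp only [hf]
      rw [List.filter_cons_of_neg (by simp [hp])]
      exact ih (i + 1)
    | some rn =>
      have hf : fsTag active (i, x) = some (rn.1, i, x) := by unfold fsTag; rw [h]; rfl
      have hp : fsP active r x = (rn.1 == r) := by unfold fsP; rw [h]
      simp only [hf]
      by_cases hr : rn.1 = r
      · rw [List.filter_cons_of_pos (by simp [hr]),
          List.filter_cons_of_pos (by simp [hp, hr])]
        simp only [List.map_cons, ih (i + 1)]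
      · rw [List.filter_cons_of_neg (by simp [hr]),
          List.filter_cons_of_neg (by simp [hp, hr])]
        exact ih (i + 1)

-- fsTag only produces ranks of active and indices of the enumeration
theorem tagged_mem_bounds (active : List (Int × List String)) (l : List String)
    (t : Int × Int × String)
    (ht : t ∈ (PySem.List.enumerate l 0).filterMap (fsTag active)) :
    (∃ rn ∈ active, t.1 = rn.1) ∧ 0 ≤ t.2.1 ∧ t.2.1 < (l.length : Int) := by
  rcases List.mem_filterMap.mp ht with ⟨p, hp, hf⟩
  rcases (PySem.List.mem_enumerate_iff l 0 p).mp hp with ⟨k, hk, rfl⟩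
  unfold fsTag at hf
  cases h : (active.find? (fun rn => fsMt rn.2 ((0 + (k : Int), l[k]) : Int × String).2)) with
  | none => rw [h] at hf; cases hf
  | some rn =>
    rw [h] at hf
    simp only [Option.map_some, Option.some.injEq] at hf
    subst hf
    refine ⟨⟨rn, List.mem_of_find?_eq_some h, rfl⟩, by simp, by simpa using hk⟩

-- tagged is pairwise strictly increasing in the index component
theorem tagged_pairwise_idx (active : List (Int × List String)) (l : List String) :
    ((PySem.List.enumerate l 0).filterMap (fsTag active)).Pairwise
      (fun a b => a.2.1 < b.2.1) := by
  rw [List.pairwise_filterMap]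
  refine (PySem.List.pairwise_lt_enumerate l 0).imp ?_
  intro a b hab y hy y' hy'
  unfold fsTag at hy hy'
  cases h : (active.find? (fun rn => fsMt rn.2 a.2)) with
  | none => rw [h] at hy; cases hy
  | some rn =>
    rw [h] at hy
    cases h' : (active.find? (fun rn => fsMt rn.2 b.2)) with
    | none => rw [h'] at hy'; cases hy'
    | some rn' =>
      rw [h'] at hy'
      simp only [Option.map_some, Option.some.injEq] at hy hy'
      subst hy; subst hy'
      simpa using hab

-- the active list is strictly increasing in rank, with nonnegative ranks
theorem fsActive_pairwise (kf : List (String × Bool)) :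
    (fsActive kf).Pairwise (fun a b => a.1 < b.1) := by
  unfold fsActive
  rw [List.pairwise_filterMap]
  refine (PySem.List.pairwise_lt_enumerate fsMatchRules 0).imp ?_
  intro a b hab y hy y' hy'
  by_cases h : (PySem.Dict.mk kf).getD a.2.1 false <;>
    by_cases h' : (PySem.Dict.mk kf).getD b.2.1 false <;>
      simp [h, h'] at hy hy'
  rw [← hy, ← hy']
  simpa using hab

theorem fsActive_nonneg (kf : List (String × Bool)) :
    ∀ rn ∈ fsActive kf, 0 ≤ rn.1 := by
  intro rn h
  unfold fsActive at h
  rcases List.mem_filterMap.mp h with ⟨q, hq, hf⟩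
  rcases (PySem.List.mem_enumerate_iff fsMatchRules 0 q).mp hq with ⟨k, hk, rfl⟩
  by_cases hb : (PySem.Dict.mk kf).getD ((0 + (k : Int), fsMatchRules[k]) : Int × _).2.1 false <;>
    simp [hb] at hf
  rw [← hf]
  simp

-- a list can be rearranged into its rank blocks
theorem perm_flatten_blocks :
    ∀ (act : List (Int × List String)) (l : List (Int × Int × String)),
    act.Pairwise (fun a b => a.1 < b.1) →
    (∀ t ∈ l, ∃ rn ∈ act, t.1 = rn.1) →
    l.Perm (act.map (fun rn => l.filter (fun t => t.1 == rn.1))).flatten := by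
  intro act
  induction act with
  | nil =>
    intro l _ hall
    cases l with
    | nil => simp
    | cons t ts => rcases hall t (by simp) with ⟨rn, h, _⟩; cases h
  | cons rn act' ih =>
    intro l hpw hall
    simp only [List.map_cons, List.flatten_cons]
    refine ((List.filter_append_perm (fun t => t.1 == rn.1) l).symm).trans
      (List.Perm.append_left _ ?_)
    have hrest := ih (l.filter (fun t => !(t.1 == rn.1))) hpw.of_cons ?_
    · refine hrest.trans ?_
      have hm : act'.map (fun rn' => (l.filter (fun t => !(t.1 == rn.1))).filter
            (fun t => t.1 == rn'.1)) = act'.map (fun rn' => l.filter (fun t => t.1 == rn'.1)) := by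
        apply List.map_congr_left
        intro rn' hrn'
        rw [List.filter_filter]
        apply List.filter_congr
        intro t _
        have hlt : rn.1 < rn'.1 := (List.pairwise_cons.mp hpw).1 rn' hrn'
        by_cases ht : t.1 = rn'.1
        · simp only [ht]
          have hne : (rn'.1 == rn.1) = false := by simp; omega
          simp [hne]
        · simp [ht]
      rw [hm]
    · intro t ht
      rcases List.mem_filter.mp ht with ⟨htl, hne⟩
      rcases hall t htl with ⟨rn', hrn', heq⟩
      rcases List.mem_cons.mp hrn' with rfl | h'
      · exfalso; simp [heq] at hne
      · exact ⟨rn', h', heq⟩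

-- insertBy only cares about the comparator's values on the elements involved
theorem insertBy_congr {α : Type} (before before' : α → α → Bool) (S : α → Prop)
    (h : ∀ a b, S a → S b → before a b = before' a b) (x : α) :
    ∀ (ys : List α), S x → (∀ y ∈ ys, S y) →
    PySem.List.insertBy before x ys = PySem.List.insertBy before' x ys := by
  intro ys
  induction ys with
  | nil => intro _ _; rfl
  | cons y ys ih =>
    intro hx hys
    simp only [PySem.List.insertBy]
    rw [h x y hx (hys y (by simp))]
    by_cases hb : before' x y <;>
      simp [hb, ih hx (fun z hz => hys z (List.mem_cons_of_mem _ hz))]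

theorem foldl_insertBy_congr {α : Type} (before before' : α → α → Bool) (S : α → Prop)
    (h : ∀ a b, S a → S b → before a b = before' a b) :
    ∀ (xs acc : List α), (∀ x ∈ xs, S x) → (∀ x ∈ acc, S x) →
    xs.foldl (fun acc x => PySem.List.insertBy before x acc) acc
      = xs.foldl (fun acc x => PySem.List.insertBy before' x acc) acc := by
  intro xs
  induction xs with
  | nil => intro acc _ _; rfl
  | cons x xs ih =>
    intro acc hxs hacc
    simp only [List.foldl_cons]
    rw [insertBy_congr before before' S h x acc (hxs x (by simp)) hacc]
    exact ih _ (fun z hz => hxs z (List.mem_cons_of_mem _ hz))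
      (fun z hz => ((PySem.List.mem_insertBy before' x z acc).mp hz).elim
        (fun he => he ▸ hxs x (by simp)) (fun hz' => hacc z hz'))

-- rank dominates the combined integer key
theorem key_lt_of_rank_lt (L r1 i1 r2 i2 : Int) (h : r1 < r2) (h0 : 0 ≤ i1)
    (hi1 : i1 < L) (hi2 : 0 ≤ i2) : r1 * (L + 1) + i1 < r2 * (L + 1) + i2 := by
  nlinarith [mul_le_mul_of_nonneg_right (by omega : r1 + 1 ≤ r2) (by omega : (0:Int) ≤ L + 1)]

-- the two-key sort of tagged is the flattening of its rank blocks
theorem sorted2_tagged_eq (act : List (Int × List String)) (l : List (Int × Int × String))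
    (L : Int)
    (hpw : act.Pairwise (fun a b => a.1 < b.1))
    (hall : ∀ t ∈ l, (∃ rn ∈ act, t.1 = rn.1) ∧ 0 ≤ t.2.1 ∧ t.2.1 < L)
    (hact : ∀ rn ∈ act, 0 ≤ rn.1)
    (hidx : l.Pairwise (fun a b => a.2.1 < b.2.1)) :
    PySem.List.sorted2 l (fun t => t.1) (fun t => t.2.1)
      = (act.map (fun rn => l.filter (fun t => t.1 == rn.1))).flatten := by
  have hS : ∀ t ∈ l, 0 ≤ t.1 ∧ 0 ≤ t.2.1 ∧ t.2.1 < L := by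
    intro t ht
    rcases hall t ht with ⟨⟨rn, hrn, heq⟩, h1, h2⟩
    exact ⟨heq ▸ hact rn hrn, h1, h2⟩
  -- the lexicographic comparator equals the combined-integer-key comparator on l
  have hcmp : ∀ a b : Int × Int × String,
      (0 ≤ a.1 ∧ 0 ≤ a.2.1 ∧ a.2.1 < L) → (0 ≤ b.1 ∧ 0 ≤ b.2.1 ∧ b.2.1 < L) →
      (decide (a.1 < b.1) || !decide (b.1 < a.1) && decide (a.2.1 < b.2.1))
        = decide (a.1 * (L + 1) + a.2.1 < b.1 * (L + 1) + b.2.1) := by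
    intro a b ha hb
    rcases lt_trichotomy a.1 b.1 with h1 | h1 | h1
    · have := key_lt_of_rank_lt L a.1 a.2.1 b.1 b.2.1 h1 ha.2.1 ha.2.2 hb.2.1
      simp [h1, this]
    · have h2 : ¬ (a.1 < b.1) := by omega
      have h3 : ¬ (b.1 < a.1) := by omega
      have h4 : (a.1 * (L + 1) + a.2.1 < b.1 * (L + 1) + b.2.1) ↔ a.2.1 < b.2.1 := by
        rw [h1]
        constructor <;> intro <;> linarith
      by_cases h5 : a.2.1 < b.2.1 <;> simp [h2, h3, h4, h5]
    · have hk := key_lt_of_rank_lt L b.1 b.2.1 a.1 a.2.1 h1 hb.2.1 hb.2.2 ha.2.1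
      have h2 : ¬ (a.1 < b.1) := by omega
      have h3 : ¬ (a.1 * (L + 1) + a.2.1 < b.1 * (L + 1) + b.2.1) := by linarith
      simp [h1, h2, h3]
  have hfold : PySem.List.sorted2 l (fun t => t.1) (fun t => t.2.1)
      = PySem.List.sorted l (fun t => t.1 * (L + 1) + t.2.1) := by
    rw [PySem.List.sorted_eq_foldl_insertBy]
    exact foldl_insertBy_congr _ _ (fun t => 0 ≤ t.1 ∧ 0 ≤ t.2.1 ∧ t.2.1 < L)
      (fun a b ha hb => hcmp a b ha hb) l [] hS (by simp)
  rw [hfold]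
  apply PySem.List.sorted_eq_of_perm_of_pairwise_lt
  · exact (perm_flatten_blocks act l hpw (fun t ht => (hall t ht).1)).symm
  · rw [List.pairwise_flatten]
    constructor
    · intro blk hblk
      rcases List.mem_map.mp hblk with ⟨rn, _, rfl⟩
      refine (List.Pairwise.sublist List.filter_sublist hidx).imp_of_mem ?_
      intro a b ha hb hab
      rcases List.mem_filter.mp ha with ⟨hal, ha1⟩
      rcases List.mem_filter.mp hb with ⟨hbl, hb1⟩
      have heq : a.1 = b.1 := by
        have h1 : a.1 = rn.1 := by simpa using ha1
        have h2 : b.1 = rn.1 := by simpa using hb1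
        omega
      rw [heq]
      linarith
    · rw [List.pairwise_map]
      refine hpw.imp_of_mem ?_
      intro rn1 rn2 _ _ hlt x hx y hy
      rcases List.mem_filter.mp hx with ⟨hxl, hx1⟩
      rcases List.mem_filter.mp hy with ⟨hyl, hy1⟩
      have hx1' : x.1 = rn1.1 := by simpa using hx1
      have hy1' : y.1 = rn2.1 := by simpa using hy1
      have hxS := hS x hxl
      have hyS := hS y hyl
      exact key_lt_of_rank_lt L x.1 x.2.1 y.1 y.2.1 (by omega) hxS.2.1 hxS.2.2 hyS.2.1

-- the heart: per-rule filtered streams and first-rank block streams dedup to the same list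
theorem main_dedup (l : List String) :
    ∀ (act : List (Int × List String)) (p : List String),
    act.Pairwise (fun a b => a.1 < b.1) →
    dedupAcc p (act.map (fun rn => l.filter (fsMt rn.2))).flatten
      = dedupAcc p (act.map (fun rn => l.filter (fsP act rn.1))).flatten := by
  intro act
  induction act with
  | nil => intro p _; rfl
  | cons rn act' ih =>
    intro p hpw
    have hlt : ∀ rn' ∈ act', rn.1 < rn'.1 := (List.pairwise_cons.mp hpw).1
    simp only [List.map_cons, List.flatten_cons, dedupAcc_append]
    have hhead : l.filter (fsP (rn :: act') rn.1) = l.filter (fsMt rn.2) := by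
      apply List.filter_congr
      intro ex _
      unfold fsP
      by_cases hm : fsMt rn.2 ex
      · rw [List.find?_cons_of_pos (by simpa using hm)]
        simp [hm]
      · rw [List.find?_cons_of_neg (by simpa using hm)]
        cases h : act'.find? (fun a => fsMt a.2 ex) with
        | none => simp [hm]
        | some a =>
          have hgt : rn.1 < a.1 := hlt a (List.mem_of_find?_eq_some h)
          have hne : (a.1 == rn.1) = false := by simp; omega
          simp [hne, hm]
    rw [hhead]
    have hmapt : act'.map (fun rn' => l.filter (fsP (rn :: act') rn'.1))
        = act'.map (fun rn' => (l.filter (fsP act' rn'.1)).filter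
            (fun ex => !fsMt rn.2 ex)) := by
      apply List.map_congr_left
      intro rn' hrn'
      rw [List.filter_filter]
      apply List.filter_congr
      intro ex _
      unfold fsP
      by_cases hm : fsMt rn.2 ex
      · rw [List.find?_cons_of_pos (by simpa using hm)]
        have hgt : rn.1 < rn'.1 := hlt rn' hrn'
        have hne : (rn.1 == rn'.1) = false := by simp; omega
        simp [hne, hm]
      · rw [List.find?_cons_of_neg (by simpa using hm)]
        simp [hm]
    have hdrop : ∀ x ∈ (act'.map (fun rn' => l.filter (fsP act' rn'.1))).flatten,
        (!fsMt rn.2 x) = false → x ∈ dedupAcc p (l.filter (fsMt rn.2)) := by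
      intro x hx hqx
      have hmx : fsMt rn.2 x := by simpa using hqx
      have hxl : x ∈ l := by
        rcases List.mem_flatten.mp hx with ⟨blk, hblk, hxblk⟩
        rcases List.mem_map.mp hblk with ⟨rn', _, rfl⟩
        exact (List.mem_filter.mp hxblk).1
      exact mem_dedupAcc_of_mem p _ (List.mem_filter.mpr ⟨hxl, hmx⟩)
    rw [hmapt, ih (dedupAcc p (l.filter (fsMt rn.2))) hpw.of_cons]
    have hfl : (act'.map (fun rn' => (l.filter (fsP act' rn'.1)).filter
          (fun ex => !fsMt rn.2 ex))).flatten
        = ((act'.map (fun rn' => l.filter (fsP act' rn'.1))).flatten).filter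
          (fun ex => !fsMt rn.2 ex) := by
      rw [List.filter_flatten, List.map_map]
      rfl
    rw [hfl, dedupAcc_filter _ _ _ hdrop]

-- A's picked list before the fill loop
theorem picked_A_eq (kf : List (String × Bool)) (examples : List String) :
    fsMatchRules.foldl (fun picked rule =>
      if (PySem.Dict.mk kf).getD rule.1 false = false then picked
      else (examples.map (fun ex => (ex, PySem.Str.lower (clean_text ex)))).foldl
        (fun picked el => if (rule.2.any fun n => PySem.Str.isIn n el.2) && !picked.contains el.1
          then picked ++ [el.1] else picked) picked) []
      = dedupAcc [] ((fsActive kf).map (fun rn => examples.filter (fsMt rn.2))).flatten := by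
  have h1 : (fun (picked : List String) (rule : String × List String) =>
      if (PySem.Dict.mk kf).getD rule.1 false = false then picked
      else (examples.map (fun ex => (ex, PySem.Str.lower (clean_text ex)))).foldl
        (fun picked el => if (rule.2.any fun n => PySem.Str.isIn n el.2) && !picked.contains el.1
          then picked ++ [el.1] else picked) picked)
      = (fun (picked : List String) (rule : String × List String) =>
          if (PySem.Dict.mk kf).getD rule.1 false = false then picked
          else dedupAcc picked (examples.filter (fsMt rule.2))) := by
    funext picked rule
    by_cases hf : (PySem.Dict.mk kf).getD rule.1 false = false
    · simp [hf]
    · rw [if_neg hf, if_neg hf, List.foldl_map]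
      exact inner_eq examples (fsMt rule.2) picked
  rw [h1]
  exact (outer_eq (fun needles p => dedupAcc p (examples.filter (fsMt needles)))
      (fun t => (PySem.Dict.mk kf).getD t false) fsMatchRules 0 []).trans
    (foldl_dedupAcc (fsActive kf) (fun rn => examples.filter (fsMt rn.2)) [])

-- B's dedup loop over the sorted tags, as a dedupAcc over example strings
theorem dedup_fold_map (X : List (Int × Int × String)) :
    X.foldl (fun p t => if p.contains t.2.2 then p else p ++ [t.2.2]) []
      = dedupAcc [] (X.map (fun t => t.2.2)) := by
  unfold dedupAcc
  exact (List.foldl_map (f := fun t : Int × Int × String => t.2.2)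
    (g := fun p x => if p.contains x then p else p ++ [x]) (l := X) (init := [])).symm

-- B's picked list before the fill loop
theorem picked_B_eq (kf : List (String × Bool)) (examples : List String) :
    (PySem.List.sorted2 ((PySem.List.enumerate examples).foldl (fun acc p =>
        match (fsActive kf).find? (fun rn => rn.2.any fun n =>
            PySem.Str.isIn n (PySem.Str.lower (clean_text p.2))) with
        | some rn => acc ++ [(rn.1, p.1, p.2)]
        | none => acc) []) (fun t => t.1) (fun t => t.2.1)).foldl
      (fun picked t => if picked.contains t.2.2 then picked else picked ++ [t.2.2]) []
    = dedupAcc [] ((fsActive kf).map (fun rn => examples.filter (fsP (fsActive kf) rn.1))).flatten := by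
  rw [tagged_eq (fsActive kf) (PySem.List.enumerate examples) [], List.nil_append]
  rw [sorted2_tagged_eq (fsActive kf)
      ((PySem.List.enumerate examples).filterMap (fsTag (fsActive kf)))
      (examples.length : Int)
      (fsActive_pairwise kf)
      (fun t ht => tagged_mem_bounds (fsActive kf) examples t ht)
      (fsActive_nonneg kf)
      (tagged_pairwise_idx (fsActive kf) examples)]
  rw [dedup_fold_map, List.map_flatten, List.map_map]
  congr 2
  apply List.map_congr_left
  intro rn _
  exact block_map_eq (fsActive kf) rn.1 examples 0

-- ===== VERDICT (by name: the statement is the Claim_ definition above) =====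
theorem filter_few_shots_spec : Claim_equal_filter_few_shots := by
  intro sb kf limit _
  show PySem.List.slice (fsFill limit (fsExamples sb)
      (fsMatchRules.foldl (fun picked rule =>
        if (PySem.Dict.mk kf).getD rule.1 false = false then picked
        else ((fsExamples sb).map (fun ex => (ex, PySem.Str.lower (clean_text ex)))).foldl
          (fun picked el => if (rule.2.any fun n => PySem.Str.isIn n el.2) && !picked.contains el.1
            then picked ++ [el.1] else picked) picked) [])) none (some limit)
    = PySem.List.slice (fsFill limit (fsExamples sb)
      ((PySem.List.sorted2 ((PySem.List.enumerate (fsExamples sb)).foldl (fun acc p =>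
          match (fsActive kf).find? (fun rn => rn.2.any fun n =>
              PySem.Str.isIn n (PySem.Str.lower (clean_text p.2))) with
          | some rn => acc ++ [(rn.1, p.1, p.2)]
          | none => acc) []) (fun t => t.1) (fun t => t.2.1)).foldl
        (fun picked t => if picked.contains t.2.2 then picked else picked ++ [t.2.2]) [])) none (some limit)
  rw [picked_A_eq kf (fsExamples sb), picked_B_eq kf (fsExamples sb),
    main_dedup (fsExamples sb) (fsActive kf) [] (fsActive_pairwise kf)]
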